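-- pv_equiv track=rewrite | github.com/PigBotFrameworkPlugins/encrypt | test.py | dna_to_unicode
-- ===== SOURCE A (Python) =====
-- def dna_to_unicode(dna_list):
--     symbols = ["A", "G", "C", "T"]
--     result = []
--
--     for dna in dna_list:
--         code_point = 0
--
--         # 将DNA表示转换回Unicode码点
--         for i, char in enumerate(reversed(dna)):
--             code_point += symbols.index(char) << (2 * i)  # 每个字符占用2位
--
--         result.append(chr(code_point))  # 转回Unicode字符
--
--     return ''.join(result)
-- ===== SOURCE B (Python) =====
-- _TABLE = str.maketrans("AGCT", "0123")
--
-- def dna_to_unicode(dna_list):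
--     return ''.join(chr(int(dna.translate(_TABLE), 4)) if dna else '\x00'
--                    for dna in dna_list)
-- ===== Notes on version B (the rewrite author's own statement) =====
-- stated objective: idiomatic
-- what changed: B replaces A's per-string reversed enumerate/shift-accumulate loop with a translation table mapping AGCT to 0123 and Python's built-in base-4 integer parser int(s, 4) (guarding the empty string to chr(0)), joined in a single generator expression.
import Mathlib
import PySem

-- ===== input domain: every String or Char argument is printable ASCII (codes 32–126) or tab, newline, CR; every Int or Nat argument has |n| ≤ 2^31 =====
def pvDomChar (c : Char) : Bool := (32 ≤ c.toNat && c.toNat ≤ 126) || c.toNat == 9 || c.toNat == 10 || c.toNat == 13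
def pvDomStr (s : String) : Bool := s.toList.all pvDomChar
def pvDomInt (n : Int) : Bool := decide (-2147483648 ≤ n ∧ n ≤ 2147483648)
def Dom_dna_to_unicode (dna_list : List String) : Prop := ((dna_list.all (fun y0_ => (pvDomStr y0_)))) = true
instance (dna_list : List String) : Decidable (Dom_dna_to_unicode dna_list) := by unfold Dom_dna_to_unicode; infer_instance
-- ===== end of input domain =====

-- B decodes each DNA string with a base-4 integer parse over a letter→digit translation
-- table instead of A's reversed shift-accumulate loop (objective: idiomatic).

-- ===== PORT A =====
-- for dna: code_point = Σ symbols.index(char) << (2*i) over enumerate(reversed(dna));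
-- state is (i, code_point); symbols.index via PySem.List.index? (inside Pre_ it always finds)
def dna_to_unicode (dna_list : List String) : String :=
  String.mk (dna_list.map (fun dna =>
    let cp := ((dna.toList.reverse).foldl
      (fun (st : Nat × Nat) ch =>
        (st.1 + 1,
         st.2 + ((PySem.List.index? ["A", "G", "C", "T"] (String.mk [ch])).getD 0) <<< (2 * st.1)))
      (0, 0)).2
    Char.ofNat cp))

-- ===== PORT B =====
-- dna.translate(str.maketrans("AGCT","0123")): mapped letters become digits, others unchanged
def pvTrans (c : Char) : Char :=
  if c = 'A' then '0' else if c = 'G' then '1' else if c = 'C' then '2'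
  else if c = 'T' then '3' else c

-- int(s, 4): Horner accumulation over the digit characters (exact on base-4 digit strings)
def pvInt4 (l : List Char) : Nat :=
  l.foldl (fun acc c => 4 * acc + (c.toNat - '0'.toNat)) 0

def dna_to_unicode_alt (dna_list : List String) : String :=
  String.mk (dna_list.map (fun dna =>
    if dna.isEmpty then Char.ofNat 0
    else Char.ofNat (pvInt4 (dna.toList.map pvTrans))))

-- ===== PRECONDITION & SPEC =====
-- a string's decoded code point, with leading A's (zero digits) stripped, is a lone UTF-16
-- surrogate (U+D800–U+DFFF) exactly when 8 significant digits remain and they start with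
-- "TGC" or "TGT", and exceeds 0x10FFFF exactly when ≥ 12 significant digits remain or 11
-- remain not starting with "GAA"; everything else decodes to a Lean-representable Char
def pvRepresentable (t : List Char) : Prop :=
  t.length ≤ 7 ∨
  (t.length = 8 ∧ t.take 3 ≠ ['T', 'G', 'C'] ∧ t.take 3 ≠ ['T', 'G', 'T']) ∨
  t.length = 9 ∨ t.length = 10 ∨
  (t.length = 11 ∧ t.take 3 = ['G', 'A', 'A'])

-- Pre_ excludes (a) strings with a character outside {A,G,C,T}, on which A raises ValueError,
-- (b) strings decoding above 0x10FFFF, where chr raises, and (c) strings decoding to a lone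
-- surrogate code point, where A's returned character is not a value of Lean's Char/String type.
def Pre_dna_to_unicode (dna_list : List String) : Prop :=
  ∀ s ∈ dna_list,
    (s.toList.all (fun c => (['A', 'G', 'C', 'T'] : List Char).contains c)) = true ∧
    pvRepresentable (s.toList.dropWhile (fun c => c = 'A'))
instance (dna_list : List String) : Decidable (Pre_dna_to_unicode dna_list) := by
  unfold Pre_dna_to_unicode pvRepresentable; infer_instance
def pvWitness_dna_to_unicode : List String := ["GAT", "", "CCGATTGA", "TTTTTTTTTT"]

def Spec_dna_to_unicode (dna_list : List String) (out : String) : Prop := out = dna_to_unicode_alt dna_list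
instance (dna_list : List String) (out : String) : Decidable (Spec_dna_to_unicode dna_list out) := by unfold Spec_dna_to_unicode; infer_instance

-- ===== CLAIM (what is proved, stated in full; the proofs are below) =====
def Claim_equal_dna_to_unicode : Prop := ∀ (dna_list : List String), Dom_dna_to_unicode dna_list → Pre_dna_to_unicode dna_list → Spec_dna_to_unicode dna_list (dna_to_unicode dna_list)

-- ===== LEMMAS AND PROOFS =====

-- little-endian base-4 value of a (reversed) DNA string, digit of the head has weight 1
def pvVal (l : List Char) : Nat :=
  match l with
  | [] => 0
  | c :: r => ((PySem.List.index? ["A", "G", "C", "T"] (String.mk [c])).getD 0) + 4 * pvVal r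

theorem pvAfold (r : List Char) : ∀ (i acc : Nat),
    (r.foldl
      (fun (st : Nat × Nat) ch =>
        (st.1 + 1,
         st.2 + ((PySem.List.index? ["A", "G", "C", "T"] (String.mk [ch])).getD 0) <<< (2 * st.1)))
      (i, acc)).2 = acc + 4 ^ i * pvVal r := by
  induction r with
  | nil => intro i acc; simp [pvVal]
  | cons c t ih =>
    intro i acc
    simp only [List.foldl_cons, pvVal, ih]
    rw [Nat.shiftLeft_eq]
    have h2 : (2 : ℕ) ^ (2 * i) = 4 ^ i := by
      rw [pow_mul]; norm_num
    rw [h2]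
    ring

theorem pvVal_append (xs : List Char) (c : Char) :
    pvVal (xs ++ [c]) =
      pvVal xs + 4 ^ xs.length * ((PySem.List.index? ["A", "G", "C", "T"] (String.mk [c])).getD 0) := by
  induction xs with
  | nil => simp [pvVal]
  | cons d t ih => simp [pvVal, ih, pow_succ]; ring

theorem pvDigit_eq (c : Char) (hc : c ∈ (['A', 'G', 'C', 'T'] : List Char)) :
    (pvTrans c).toNat - '0'.toNat
      = (PySem.List.index? ["A", "G", "C", "T"] (String.mk [c])).getD 0 := by
  fin_cases hc <;> decide

theorem pvBfold (l : List Char) (hl : ∀ c ∈ l, c ∈ (['A', 'G', 'C', 'T'] : List Char)) :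
    ∀ acc : Nat,
      (l.map pvTrans).foldl (fun acc c => 4 * acc + (c.toNat - '0'.toNat)) acc
        = acc * 4 ^ l.length + pvVal l.reverse := by
  induction l with
  | nil => intro acc; simp [pvVal]
  | cons c t ih =>
    intro acc
    simp only [List.map_cons, List.foldl_cons, List.reverse_cons, List.length_cons]
    rw [ih (fun d hd => hl d (List.mem_cons_of_mem _ hd)),
        pvVal_append, pvDigit_eq c (hl c (List.mem_cons_self ..)),
        List.length_reverse, pow_succ]
    ring

theorem pvString_eq (s : String)
    (hs : ∀ c ∈ s.toList, c ∈ (['A', 'G', 'C', 'T'] : List Char)) :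
    (if s.isEmpty then Char.ofNat 0 else Char.ofNat (pvInt4 (s.toList.map pvTrans)))
      = Char.ofNat ((s.toList.reverse.foldl
          (fun (st : Nat × Nat) ch =>
            (st.1 + 1,
             st.2 + ((PySem.List.index? ["A", "G", "C", "T"] (String.mk [ch])).getD 0) <<< (2 * st.1)))
          (0, 0)).2) := by
  rw [pvAfold]
  by_cases he : s.isEmpty
  · have hs0 : s = "" := by simpa [String.isEmpty_iff] using he
    subst hs0
    simp [pvVal]
  · rw [if_neg he, pvInt4, pvBfold s.toList hs 0]
    congr 1
    simp

-- ===== VERDICT (by name: the statement is the Claim_ definition above) =====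
theorem dna_to_unicode_spec : Claim_equal_dna_to_unicode := by
  intro dna_list _ hpre
  unfold Spec_dna_to_unicode dna_to_unicode dna_to_unicode_alt
  congr 1
  refine List.map_congr_left (fun s hs => ?_)
  obtain ⟨hall, _⟩ := hpre s hs
  exact (pvString_eq s (fun c hc => by simpa using List.all_eq_true.mp hall c hc)).symm
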